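-- pv_equiv track=rewrite | github.com/Kapiura/JSP2022 | lista5/z4.py | szyfrowanie
-- ===== SOURCE A (Python) =====
-- klucz = {
--     'a' : 'y',
--     'e' : 'i',
--     'i' : 'o',
--     'o' : 'a',
--     'y' : 'e'
--     }
--
-- def szyfrowanie(slowo):
--     a = slowo
--     a = a.split()
--     slowo = slowo.split()
--     for i in range(len(slowo)):
--         sl = slowo[i]
--         slowo[i] = list(sl)
--     for i in range(len(a)):
--         sl = slowo[i]
--         a[i] = list(sl)
--     for dv, v in klucz.items():
--         for i in range(len(slowo)):
--             for j in range(len(slowo[i])):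
--                 if slowo[i][j] == dv and slowo[i][j] == a[i][j]:
--                     slowo[i][j] = v
--     for i in range(len(slowo)):
--         slowo[i] = "".join(slowo[i])
--         a[i] = "".join(a[i])
--     slowo = str(' '.join(slowo))
--     return(slowo)
-- ===== SOURCE B (Python) =====
-- klucz = {
--     'a' : 'y',
--     'e' : 'i',
--     'i' : 'o',
--     'o' : 'a',
--     'y' : 'e'
--     }
--
-- def szyfrowanie(slowo):
--     return ' '.join(''.join(klucz.get(c, c) for c in w) for w in slowo.split())
-- ===== Notes on version B (the rewrite author's own statement) =====
-- stated objective: simpler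
-- what changed: A's four sequential index-loop passes (list-of-lists conversion, a duplicate copy `a`, a five-key in-place mutation scan, and a rejoin pass) are replaced by a single comprehension that splits the input and maps each character once through klucz.get(c, c).
import Mathlib
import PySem

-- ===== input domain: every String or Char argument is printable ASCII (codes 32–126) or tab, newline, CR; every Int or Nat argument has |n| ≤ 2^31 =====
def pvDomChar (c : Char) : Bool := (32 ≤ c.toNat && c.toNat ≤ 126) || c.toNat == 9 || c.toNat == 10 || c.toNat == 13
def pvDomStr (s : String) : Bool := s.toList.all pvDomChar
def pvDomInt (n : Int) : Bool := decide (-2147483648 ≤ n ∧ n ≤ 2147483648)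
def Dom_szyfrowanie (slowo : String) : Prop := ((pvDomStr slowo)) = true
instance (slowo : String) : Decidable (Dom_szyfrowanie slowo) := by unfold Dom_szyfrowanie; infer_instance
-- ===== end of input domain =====

-- B replaces A's five-key nested index-loop machinery (with the dual copy `a`) by a single
-- per-character dict lookup with default, rejoining the split words; objective: simpler.

-- ===== PORT A =====
-- the module-level dict `klucz`, in insertion order
def pvKlucz : List (Char × Char) := [('a','y'),('e','i'),('i','o'),('o','a'),('y','e')]

-- one iteration of A's innermost `for j` body: slowo[i][j] indexing is always in range,
-- so indexing is ported as getD with a dummy default (exact on in-range indices)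
def pvStepJ (dv v : Char) (aw : List Char) (w : List Char) (j : Nat) : List Char :=
  if w.getD j ' ' = dv ∧ w.getD j ' ' = aw.getD j ' ' then w.set j v else w

-- A's `for j in range(len(slowo[i]))` loop
def pvLoopJ (dv v : Char) (aw w : List Char) : List Char :=
  (List.range w.length).foldl (pvStepJ dv v aw) w

-- A's `for i in range(len(slowo))` loop (inside the key loop)
def pvLoopI (dv v : Char) (a s : List (List Char)) : List (List Char) :=
  (List.range s.length).foldl (fun s i => s.set i (pvLoopJ dv v (a.getD i []) (s.getD i []))) s

def szyfrowanie (slowo : String) : String :=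
  let words := PySem.Str.split₀ slowo          -- slowo.split()
  let s0 := words.map String.toList            -- slowo[i] = list(sl)
  let a := s0                                  -- a[i] = list(sl): a value-copy of the same lists
  let s1 := pvKlucz.foldl (fun s p => pvLoopI p.1 p.2 a s) s0   -- for dv, v in klucz.items(): …
  PySem.Str.join " " (s1.map String.ofList)        -- "".join per word, then ' '.join

-- ===== PORT B =====
def pvKluczD : PySem.Dict Char Char := PySem.Dict.ofList pvKlucz

def szyfrowanie_alt (slowo : String) : String :=
  PySem.Str.join " "
    ((PySem.Str.split₀ slowo).map
      (fun w => String.ofList (w.toList.map (fun c => PySem.Dict.getD pvKluczD c c))))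

-- ===== PRECONDITION & SPEC =====
def Spec_szyfrowanie (slowo : String) (out : String) : Prop := out = szyfrowanie_alt slowo
instance (slowo : String) (out : String) : Decidable (Spec_szyfrowanie slowo out) := by unfold Spec_szyfrowanie; infer_instance

-- ===== CLAIM (what is proved, stated in full; the proofs are below) =====
def Claim_equal_szyfrowanie : Prop := ∀ (slowo : String), Dom_szyfrowanie slowo → Spec_szyfrowanie slowo (szyfrowanie slowo)

-- ===== LEMMAS AND PROOFS =====

-- (range l.length).map (F ∘ getD) is map F
theorem pv_map_range_getD {α β : Type} (da : α) (F : α → β) (l : List α) :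
    (List.range l.length).map (fun j => F (l.getD j da)) = l.map F := by
  apply List.ext_getElem
  · simp
  · intro i h1 h2
    simp only [List.length_map, List.length_range] at h1
    simp [List.getD_eq_getElem?_getD, List.getElem?_eq_getElem h1]

-- generic: folding "set index j to g (a[j]) (s[j])" over range n rewrites the first n cells
theorem pv_foldl_set_range {α : Type} (da : α) (g : α → α → α) (a : List α)
    (f : List α → Nat → List α)
    (hf : ∀ (s : List α) (j : Nat), j < s.length →
        f s j = s.set j (g (a.getD j da) (s.getD j da))) :
    ∀ (n : Nat) (b : List α), n ≤ b.length →
      (List.range n).foldl f b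
        = (List.range b.length).map
            (fun j => if j < n then g (a.getD j da) (b.getD j da) else b.getD j da) := by
  intro n
  induction n with
  | zero =>
      intro b _
      simp only [List.range_zero, List.foldl_nil, Nat.not_lt_zero, if_false]
      symm
      simpa using pv_map_range_getD da id b
  | succ n ih =>
      intro b hb
      rw [List.range_succ, List.foldl_append, List.foldl_cons, List.foldl_nil,
        ih b (Nat.le_of_succ_le hb)]
      have hlen : ((List.range b.length).map
          (fun j => if j < n then g (a.getD j da) (b.getD j da) else b.getD j da)).length = b.length := by simp
      rw [hf _ n (by omega)]
      apply List.ext_getElem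
      · simp
      · intro i hi1 hi2
        simp only [List.length_set, hlen] at hi1
        by_cases hin : i = n
        · subst hin
          rw [List.getElem_set_self (by omega)]
          simp only [List.getD_eq_getElem?_getD, List.getElem?_map, List.getElem?_range (by omega : i < b.length)]
          simp [List.getElem?_eq_getElem (by omega : i < b.length)]
        · rw [List.getElem_set_ne (by omega)]
          simp only [List.getElem_map, List.getElem_range]
          by_cases h3 : i < n
          · rw [if_pos h3, if_pos (by omega)]
          · rw [if_neg h3, if_neg (by omega)]


theorem pv_set_self {α : Type} (da : α) (s : List α) (j : Nat) (h : j < s.length) :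
    s.set j (s.getD j da) = s := by
  rw [List.getD_eq_getElem _ _ h, List.set_getElem_self]

theorem pvLoopJ_map {dv v : Char} (h : Char → Char) (w : List Char) :
    pvLoopJ dv v w (w.map h)
      = w.map (fun c => if h c = dv ∧ h c = c then v else h c) := by
  unfold pvLoopJ
  rw [pv_foldl_set_range ' ' (fun x y => if y = dv ∧ y = x then v else y) w
    (pvStepJ dv v w)
    (by
      intro s j hj
      show pvStepJ dv v w s j = _
      unfold pvStepJ
      by_cases hc : s.getD j ' ' = dv ∧ s.getD j ' ' = w.getD j ' '
      · rw [if_pos hc]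
        show s.set j v = s.set j (if s.getD j ' ' = dv ∧ s.getD j ' ' = w.getD j ' ' then v else s.getD j ' ')
        rw [if_pos hc]
      · rw [if_neg hc]
        show s = s.set j (if s.getD j ' ' = dv ∧ s.getD j ' ' = w.getD j ' ' then v else s.getD j ' ')
        rw [if_neg hc, pv_set_self ' ' s j hj])
    (w.map h).length (w.map h) le_rfl]
  apply List.ext_getElem
  · simp
  · intro i h1 h2
    simp only [List.length_map, List.length_range] at h1
    simp [List.getD_eq_getElem?_getD, List.getElem?_map, h1]

theorem pvLoopI_map {dv v : Char} (h : Char → Char) (a : List (List Char)) :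
    pvLoopI dv v a (a.map (List.map h))
      = a.map (List.map (fun c => if h c = dv ∧ h c = c then v else h c)) := by
  unfold pvLoopI
  rw [pv_foldl_set_range [] (fun x y => pvLoopJ dv v x y) a _
    (by intro s i hi; rfl)
    (a.map (List.map h)).length (a.map (List.map h)) le_rfl]
  apply List.ext_getElem
  · simp
  · intro i h1 h2
    simp only [List.length_map, List.length_range] at h1
    have hia : i < a.length := by simpa using h1
    simp only [List.getElem_map, List.getElem_range, List.length_map, h1, if_pos]
    rw [List.getD_eq_getElem _ _ (by omega), List.getD_eq_getElem _ _ (by simpa using hia)]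
    simp only [List.getElem_map]
    exact pvLoopJ_map h a[i]

-- the per-character effect of the whole key loop
def pvApply (P : List (Char × Char)) (h : Char → Char) (c : Char) : Char :=
  P.foldl (fun x p => if x = p.1 ∧ x = c then p.2 else x) (h c)

theorem pv_klucz_invariant (P : List (Char × Char)) :
    ∀ (h : Char → Char) (a : List (List Char)),
      P.foldl (fun s p => pvLoopI p.1 p.2 a s) (a.map (List.map h))
        = a.map (List.map (pvApply P h)) := by
  induction P with
  | nil => intro h a; simp [pvApply]
  | cons p P ih =>
      intro h a
      obtain ⟨dv, v⟩ := p
      rw [List.foldl_cons]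
      have : pvLoopI dv v a (a.map (List.map h))
          = a.map (List.map (fun c => if h c = dv ∧ h c = c then v else h c)) := pvLoopI_map h a
      rw [this, ih (fun c => if h c = dv ∧ h c = c then v else h c) a]
      rfl

theorem pvApply_klucz (c : Char) :
    pvApply pvKlucz id c = PySem.Dict.getD pvKluczD c c := by
  by_cases h1 : c = 'a'; · subst h1; decide
  by_cases h2 : c = 'e'; · subst h2; decide
  by_cases h3 : c = 'i'; · subst h3; decide
  by_cases h4 : c = 'o'; · subst h4; decide
  by_cases h5 : c = 'y'; · subst h5; decide
  have b1 : ('a' == c) = false := by simp [Ne.symm h1]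
  have b2 : ('e' == c) = false := by simp [Ne.symm h2]
  have b3 : ('i' == c) = false := by simp [Ne.symm h3]
  have b4 : ('o' == c) = false := by simp [Ne.symm h4]
  have b5 : ('y' == c) = false := by simp [Ne.symm h5]
  simp [pvApply, pvKlucz, pvKluczD, PySem.Dict.ofList, PySem.Dict.getD, PySem.Dict.get?,
    PySem.Dict.update, PySem.Dict.insert, PySem.Dict.empty, List.find?, h1, h2, h3, h4, h5,
    b1, b2, b3, b4, b5]

-- ===== VERDICT (by name: the statement is the Claim_ definition above) =====
theorem szyfrowanie_spec : Claim_equal_szyfrowanie := by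
  intro slowo _
  unfold Spec_szyfrowanie
  simp only [szyfrowanie, szyfrowanie_alt]
  have hinv := pv_klucz_invariant pvKlucz id ((PySem.Str.split₀ slowo).map String.toList)
  rw [show List.map (List.map id) (List.map String.toList (PySem.Str.split₀ slowo)) = List.map String.toList (PySem.Str.split₀ slowo) by simp] at hinv
  rw [hinv]
  have hF : pvApply pvKlucz id = fun c => PySem.Dict.getD pvKluczD c c := funext pvApply_klucz
  rw [hF]
  simp only [List.map_map]
  rfl
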